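-- pv_equiv track=rewrite | github.com/jarredbarber/openlemma | exploration/check_b3b_emptiness.py | dominates
-- ===== SOURCE A (Python) =====
-- def get_base_digits(n, base):
--     if n == 0: return [0]
--     digits = []
--     while n:
--         digits.append(n % base)
--         n //= base
--     return digits
--
-- def dominates(a_val, b_val, p):
--     # Check if digits of a_val <= digits of b_val in base p
--     # Digits must assume infinite zeros for higher positions
--     da = get_base_digits(a_val, p)
--     db = get_base_digits(b_val, p)
--
--     for i in range(len(da)):
--         val_a = da[i]
--         val_b = db[i] if i < len(db) else 0
--         if val_a > val_b:
--             return False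
--     return True
-- ===== SOURCE B (Python) =====
-- def digit_sum(n, q):
--     # sum of the base-q digits of n (Python % and // semantics)
--     s = 0
--     while n:
--         s += n % q
--         n //= q
--     return s
--
--
-- def reinterpret(n, p):
--     # the nonnegative integer whose base-(-p) digits are the negated base-p digits of n
--     w = 0
--     m = 1
--     while n:
--         w += -(n % p) * m
--         m *= -p
--         n //= p
--     return w
--
--
-- def dominates(a_val, b_val, p):
--     # Digitwise a_val <= b_val in base p, decided by the carry-free-subtraction
--     # criterion instead of comparing digit lists: for a base q >= 2 and
--     # 0 <= x, y, every digit of x is <= the matching digit of y  iff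
--     # x <= y and digit_sum(x) + digit_sum(y - x) == digit_sum(y)
--     # (each borrow in y - x inflates the digit sum by q - 1).
--     # For p < 0 the digits of n are the nonpositive residues n % p; negating
--     # them gives the digits of reinterpret(n, p) in base q = -p, with the
--     # comparison direction reversed.
--     if p < 0:
--         x, y = reinterpret(b_val, p), reinterpret(a_val, p)
--     else:
--         x, y = a_val, b_val
--     if y < x:
--         return False
--     q = -p if p < 0 else p
--     return digit_sum(x, q) + digit_sum(y - x, q) == digit_sum(y, q)
-- ===== Notes on version B (the rewrite author's own statement) =====
-- stated objective: alternative
-- what changed: Replaces the digit-list extraction plus index-checked comparison loop by an arithmetic carry-count criterion: digitwise domination in base q>=2 holds iff x <= y and digit_sum(x)+digit_sum(y-x) == digit_sum(y) (a borrow inflates the digit sum by q-1); negative bases are first reinterpreted into base -p by negating the residues.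
-- intended difference: For p <= -2, when every compared digit position of a_val dominates but b_val has a nonzero (hence negative) digit above a_val's highest digit, A returns True because its loop only runs over a_val's digit list, while B returns False; False is intended since A's own comment says higher positions must be treated as zero digits, and the implicit zero digit of a_val is not <= a negative digit of b_val. — e.g. on dominates(0, 2, -2): A returns true, B returns false
import Mathlib
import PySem

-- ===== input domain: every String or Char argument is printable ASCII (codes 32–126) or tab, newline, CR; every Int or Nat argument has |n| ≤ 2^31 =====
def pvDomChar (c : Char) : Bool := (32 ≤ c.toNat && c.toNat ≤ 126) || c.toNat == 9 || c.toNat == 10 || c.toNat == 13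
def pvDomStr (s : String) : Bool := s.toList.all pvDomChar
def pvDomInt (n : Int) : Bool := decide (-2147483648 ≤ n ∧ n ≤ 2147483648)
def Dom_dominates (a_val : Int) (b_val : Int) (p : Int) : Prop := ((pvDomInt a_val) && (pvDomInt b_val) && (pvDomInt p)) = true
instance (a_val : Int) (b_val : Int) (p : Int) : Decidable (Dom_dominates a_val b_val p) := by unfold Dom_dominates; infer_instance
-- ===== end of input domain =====

-- B decides digitwise dominance by the arithmetic carry-count criterion (x ≤ y and
-- digit_sum x + digit_sum (y-x) = digit_sum y) instead of building and comparing digit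
-- lists (objective: alternative algorithm); on negative bases B also checks the digit
-- positions above a_val's highest digit, which A skips (see D_dominates below).

-- ===== PORT A =====
-- while n: digits.append(n % base); n //= base   (fuel n.natAbs + 3 is proved sufficient on Pre_)
def gbdLoop (base : Int) : Nat → Int → List Int → List Int
  | 0, _, digits => digits
  | f + 1, n, digits =>
      if n = 0 then digits
      else gbdLoop base f (PySem.Int.floordiv n base) (digits ++ [PySem.Int.mod n base])

def get_base_digits (n : Int) (base : Int) : List Int :=
  if n = 0 then [0] else gbdLoop base (n.natAbs + 3) n []

-- for i in range(len(da)): val_a = da[i]; val_b = db[i] if i < len(db) else 0; if val_a > val_b: return False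
def domLoop : List Int → List Int → Bool
  | [], _ => true
  | a :: da, [] => if a > 0 then false else domLoop da []
  | a :: da, b :: db => if a > b then false else domLoop da db

def dominates (a_val : Int) (b_val : Int) (p : Int) : Bool :=
  domLoop (get_base_digits a_val p) (get_base_digits b_val p)

-- ===== PORT B =====
-- s = 0; while n: s += n % q; n //= q; return s
def dsLoop (q : Int) : Nat → Int → Int → Int
  | 0, _, s => s
  | f + 1, n, s => if n = 0 then s else dsLoop q f (PySem.Int.floordiv n q) (s + PySem.Int.mod n q)

def digit_sum (n : Int) (q : Int) : Int := dsLoop q (n.natAbs + 1) n 0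

-- w = 0; m = 1; while n: w += -(n % p) * m; m *= -p; n //= p; return w
def riLoop (p : Int) : Nat → Int → Int → Int → Int
  | 0, _, w, _ => w
  | f + 1, n, w, m =>
      if n = 0 then w
      else riLoop p f (PySem.Int.floordiv n p) (w + (-(PySem.Int.mod n p)) * m) (m * (-p))

def reinterpret (n : Int) (p : Int) : Int := riLoop p (n.natAbs + 3) n 0 1

def dominates_alt (a_val : Int) (b_val : Int) (p : Int) : Bool :=
  let xy := if p < 0 then (reinterpret b_val p, reinterpret a_val p) else (a_val, b_val)
  if xy.2 < xy.1 then false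
  else
    let q := if p < 0 then -p else p
    decide (digit_sum xy.1 q + digit_sum (xy.2 - xy.1) q = digit_sum xy.2 q)

-- ===== PRECONDITION & SPEC =====
-- Pre_ excludes exactly the inputs where A raises ZeroDivisionError (p = 0 with a nonzero
-- argument) or diverges (p ∈ {-1,1} with a nonzero argument, or p ≥ 2 with a negative argument).
def Pre_dominates (a_val : Int) (b_val : Int) (p : Int) : Prop :=
  (2 ≤ p ∧ 0 ≤ a_val ∧ 0 ≤ b_val) ∨ p ≤ -2 ∨ (a_val = 0 ∧ b_val = 0 ∧ (p = 0 ∨ p = 1 ∨ p = -1))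
instance (a_val : Int) (b_val : Int) (p : Int) : Decidable (Pre_dominates a_val b_val p) := by
  unfold Pre_dominates; infer_instance

def pvWitness_dominates : Int × Int × Int := (5, 7, 2)

-- For p ≤ -2, when every base-p digit position of a_val that A inspects dominates but b_val
-- still has a nonzero (hence negative) digit above a_val's highest digit, A returns True
-- because its loop only runs over a_val's digit list, while B returns False; False is the
-- intended value since A's own comment says higher positions must assume zero digits, and
-- the implicit zero digit of a_val is not ≤ a negative digit of b_val.
-- (the i-th base-p digit of n is (⌊·/p⌋^[i] n) % p; k below is the digit count of a_val,
-- so '⌊·/p⌋^[k] b_val ≠ 0' says b_val has a nonzero digit above a_val's highest one;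
-- 64 positions always suffice on the |n| ≤ 2^31 domain Dom_dominates admits)
def D_dominates (a_val : Int) (b_val : Int) (p : Int) : Prop :=
  p ≤ -2 ∧ ∃ k < 64, 0 < k ∧ (PySem.Int.floordiv · p)^[k] a_val = 0 ∧
    (PySem.Int.floordiv · p)^[k] b_val ≠ 0 ∧
    ∀ i < k, PySem.Int.mod ((PySem.Int.floordiv · p)^[i] a_val) p
      ≤ PySem.Int.mod ((PySem.Int.floordiv · p)^[i] b_val) p
instance (a_val : Int) (b_val : Int) (p : Int) : Decidable (D_dominates a_val b_val p) := by
  unfold D_dominates; infer_instance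

def Spec_dominates (a_val : Int) (b_val : Int) (p : Int) (out : Bool) : Prop :=
  ¬ D_dominates a_val b_val p → out = dominates_alt a_val b_val p
instance (a_val : Int) (b_val : Int) (p : Int) (out : Bool) : Decidable (Spec_dominates a_val b_val p out) := by
  unfold Spec_dominates; infer_instance

def pvDiffWitness_dominates : Int × Int × Int := (0, 2, -2)
def pvDiffWitnessOut_dominates : Bool × Bool := (true, false)

-- ===== CLAIM (what is proved, stated in full; the proofs are below) =====
def Claim_unchanged_dominates : Prop := ∀ (a_val : Int) (b_val : Int) (p : Int), Dom_dominates a_val b_val p → Pre_dominates a_val b_val p → Spec_dominates a_val b_val p (dominates a_val b_val p)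
def Claim_changed_dominates : Prop := Dom_dominates (pvDiffWitness_dominates.1) (pvDiffWitness_dominates.2.1) (pvDiffWitness_dominates.2.2) ∧ Pre_dominates (pvDiffWitness_dominates.1) (pvDiffWitness_dominates.2.1) (pvDiffWitness_dominates.2.2) ∧ D_dominates (pvDiffWitness_dominates.1) (pvDiffWitness_dominates.2.1) (pvDiffWitness_dominates.2.2) ∧ dominates (pvDiffWitness_dominates.1) (pvDiffWitness_dominates.2.1) (pvDiffWitness_dominates.2.2) = pvDiffWitnessOut_dominates.1 ∧ dominates_alt (pvDiffWitness_dominates.1) (pvDiffWitness_dominates.2.1) (pvDiffWitness_dominates.2.2) = pvDiffWitnessOut_dominates.2 ∧ pvDiffWitnessOut_dominates.1 ≠ pvDiffWitnessOut_dominates.2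
def Claim_exact_dominates : Prop := ∀ (a_val : Int) (b_val : Int) (p : Int), Dom_dominates a_val b_val p → Pre_dominates a_val b_val p → D_dominates a_val b_val p → dominates a_val b_val p ≠ dominates_alt a_val b_val p

-- ===== LEMMAS AND PROOFS =====

-- proof-side digit helpers: pIter p i n is the i-th quotient iterate, digAt p n i the
-- i-th base-p digit, lenp p n the number of digit positions A inspects
def pIter (p : Int) : Nat → Int → Int
  | 0, n => n
  | i + 1, n => pIter p i (PySem.Int.floordiv n p)

def digAt (p n : Int) (i : Nat) : Int := PySem.Int.mod (pIter p i n) p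

def lenF (p : Int) : Nat → Int → Nat
  | 0, _ => 0
  | f + 1, n => if n = 0 then 0 else lenF p f (PySem.Int.floordiv n p) + 1

def lenp (p n : Int) : Nat := if n = 0 then 1 else lenF p 64 n

-- ---- generic division toolkit (Python floor semantics, positive divisor) ----

theorem fdm_unique {q n k r : Int} (hq : 0 < q) (hrep : n = q * k + r) (h0 : 0 ≤ r) (h1 : r < q) :
    PySem.Int.floordiv n q = k ∧ PySem.Int.mod n q = r := by
  have hd : PySem.Int.floordiv n q = k :=
    (PySem.Int.floordiv_eq_iff_of_pos hq).mpr ⟨by nlinarith, by nlinarith⟩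
  have hm := PySem.Int.floordiv_mul_add_mod n q
  rw [hd] at hm
  have hc : k * q = q * k := mul_comm k q
  exact ⟨hd, by omega⟩

theorem fd_nonneg_pos {n p : Int} (hp : 2 ≤ p) (hn : 0 ≤ n) : 0 ≤ PySem.Int.floordiv n p := by
  obtain ⟨hlo, hhi⟩ := (PySem.Int.floordiv_eq_iff_of_pos (a := n) (b := p) (by omega)).mp rfl
  nlinarith

theorem fd_lt_pos {n p : Int} (hp : 2 ≤ p) (hn : 0 < n) : PySem.Int.floordiv n p < n := by
  obtain ⟨hlo, hhi⟩ := (PySem.Int.floordiv_eq_iff_of_pos (a := n) (b := p) (by omega)).mp rfl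
  nlinarith

theorem fd_le_fd {a b p : Int} (hp : 2 ≤ p) (hab : a ≤ b) :
    PySem.Int.floordiv a p ≤ PySem.Int.floordiv b p := by
  obtain ⟨hlo, hhi⟩ := (PySem.Int.floordiv_eq_iff_of_pos (a := a) (b := p) (by omega)).mp rfl
  obtain ⟨hlo', hhi'⟩ := (PySem.Int.floordiv_eq_iff_of_pos (a := b) (b := p) (by omega)).mp rfl
  nlinarith

theorem mod_zero_left (p : Int) : PySem.Int.mod 0 p = 0 := by
  simp [PySem.Int.mod, Int.zero_fmod]

theorem fd_zero_left (p : Int) : PySem.Int.floordiv 0 p = 0 := by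
  simp [PySem.Int.floordiv, Int.zero_fdiv]

-- negative-base quotient facts
theorem natAbs_fd_lt_neg {n p : Int} (hp : p ≤ -2) (hn : 3 ≤ n.natAbs) :
    (PySem.Int.floordiv n p).natAbs < n.natAbs := by
  rw [show n = -(-n) by ring, show p = -(-p) by ring, PySem.Int.floordiv_neg_neg]
  obtain ⟨hlo, hhi⟩ := (PySem.Int.floordiv_eq_iff_of_pos (a := -n) (b := -p) (by omega)).mp rfl
  generalize hq : PySem.Int.floordiv (-n) (-p) = q at hlo hhi ⊢
  by_cases hpos : 0 ≤ -n
  · have h1 : 0 ≤ q := by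
      by_contra hc
      have hmul : (q + 1) * (-p) ≤ (q + 1) * 2 :=
        mul_le_mul_of_nonpos_left (by omega : (2 : Int) ≤ -p) (by omega : q + 1 ≤ 0)
      omega
    have h2 : q < -n := by
      by_contra hc
      have hmul : q * 2 ≤ q * (-p) :=
        mul_le_mul_of_nonneg_left (by omega : (2 : Int) ≤ -p) (by omega : 0 ≤ q)
      omega
    omega
  · have h1 : q ≤ 0 := by
      by_contra hc
      have hmul : q * 2 ≤ q * (-p) :=
        mul_le_mul_of_nonneg_left (by omega : (2 : Int) ≤ -p) (by omega : 0 ≤ q)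
      omega
    have h2 : -n < q := by
      by_cases hc : -1 ≤ q
      · omega
      · have hmul : (q + 1) * (-p) ≤ (q + 1) * 2 :=
          mul_le_mul_of_nonpos_left (by omega : (2 : Int) ≤ -p) (by omega : q + 1 ≤ 0)
        omega
    omega

theorem fd_small_neg {n p : Int} (hp : p ≤ -2) (hn : n.natAbs ≤ 2) :
    (PySem.Int.floordiv n p).natAbs ≤ 1 := by
  rw [show n = -(-n) by ring, show p = -(-p) by ring, PySem.Int.floordiv_neg_neg]
  obtain ⟨hlo, hhi⟩ := (PySem.Int.floordiv_eq_iff_of_pos (a := -n) (b := -p) (by omega)).mp rfl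
  generalize hq : PySem.Int.floordiv (-n) (-p) = q at hlo hhi ⊢
  have h1 : -1 ≤ q := by
    by_contra hc
    have hmul : (q + 1) * (-p) ≤ (q + 1) * 2 :=
      mul_le_mul_of_nonpos_left (by omega : (2 : Int) ≤ -p) (by omega : q + 1 ≤ 0)
    omega
  have h2 : q ≤ 1 := by
    by_contra hc
    have hmul : q * 2 ≤ q * (-p) :=
      mul_le_mul_of_nonneg_left (by omega : (2 : Int) ≤ -p) (by omega : 0 ≤ q)
    omega
  omega

theorem fd_halve_neg {n p : Int} (hp : p ≤ -2) :
    2 * (PySem.Int.floordiv n p).natAbs ≤ n.natAbs + 1 := by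
  rw [show n = -(-n) by ring, show p = -(-p) by ring, PySem.Int.floordiv_neg_neg]
  obtain ⟨hlo, hhi⟩ := (PySem.Int.floordiv_eq_iff_of_pos (a := -n) (b := -p) (by omega)).mp rfl
  generalize hq : PySem.Int.floordiv (-n) (-p) = q at hlo hhi ⊢
  by_cases h0 : 0 ≤ q
  · have hmul : q * 2 ≤ q * (-p) :=
      mul_le_mul_of_nonneg_left (by omega : (2 : Int) ≤ -p) h0
    omega
  · have hmul : (q + 1) * (-p) ≤ (q + 1) * 2 :=
      mul_le_mul_of_nonpos_left (by omega : (2 : Int) ≤ -p) (by omega : q + 1 ≤ 0)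
    omega

theorem fd_negone_neg {p : Int} (hp : p ≤ -2) : PySem.Int.floordiv (-1) p = 0 := by
  rw [show (-1 : Int) = -(1 : Int) by ring, show p = -(-p) by ring, PySem.Int.floordiv_neg_neg]
  rw [PySem.Int.floordiv_eq_iff_of_pos (by omega)]
  constructor <;> nlinarith

theorem fd_one_neg {p : Int} (hp : p ≤ -2) : PySem.Int.floordiv 1 p = -1 := by
  rw [show (1 : Int) = -(-1 : Int) by ring, show p = -(-p) by ring, PySem.Int.floordiv_neg_neg]
  rw [PySem.Int.floordiv_eq_iff_of_pos (by omega)]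
  constructor <;> nlinarith

-- ---- the digit tail of A's while-loop, and fuel bookkeeping ----

def dl (p : Int) : Nat → Int → List Int
  | 0, _ => []
  | f + 1, n => if n = 0 then [] else PySem.Int.mod n p :: dl p f (PySem.Int.floordiv n p)

def reach (p : Int) : Nat → Int → Prop
  | 0, n => n = 0
  | f + 1, n => n = 0 ∨ reach p f (PySem.Int.floordiv n p)

theorem dl_zero (p : Int) (f : Nat) : dl p f 0 = [] := by
  cases f <;> simp [dl]

theorem gbdLoop_append (p : Int) (f : Nat) : ∀ (n : Int) (digits : List Int),
    gbdLoop p f n digits = digits ++ dl p f n := by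
  induction f with
  | zero => intro n digits; simp [gbdLoop, dl]
  | succ f ih =>
      intro n digits
      by_cases h : n = 0
      · simp [gbdLoop, dl, h]
      · simp [gbdLoop, dl, h, ih]

theorem reach_mono (p : Int) : ∀ (k k' : Nat) (n : Int), reach p k n → k ≤ k' → reach p k' n := by
  intro k
  induction k with
  | zero =>
      intro k' n h _
      cases k' with
      | zero => exact h
      | succ k'' => exact Or.inl h
  | succ k ih =>
      intro k' n h hle
      cases k' with
      | zero => omega
      | succ k'' =>
          rcases h with h | h
          · exact Or.inl h
          · exact Or.inr (ih k'' _ h (by omega))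

theorem dl_eq_of_reach (p : Int) : ∀ (k k' : Nat) (n : Int),
    reach p k n → reach p k' n → dl p k n = dl p k' n := by
  intro k
  induction k with
  | zero =>
      intro k' n h _
      have : n = 0 := h
      subst this
      simp [dl_zero, dl]
  | succ k ih =>
      intro k' n h h'
      by_cases hn : n = 0
      · subst hn; simp [dl_zero]
      · rcases h with h | h
        · exact absurd h hn
        · cases k' with
          | zero => exact absurd h' hn
          | succ k'' =>
              rcases h' with h' | h'
              · exact absurd h' hn
              · simp [dl, hn, ih k'' _ h h']

theorem reach_negone {p : Int} (hp : p ≤ -2) : reach p 2 (-1) := by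
  refine Or.inr ?_
  rw [fd_negone_neg hp]
  exact Or.inl rfl

theorem reach_one {p : Int} (hp : p ≤ -2) : reach p 3 1 := by
  refine Or.inr ?_
  rw [fd_one_neg hp]
  exact reach_negone hp

theorem reach_fuel {p : Int} (hgood : 2 ≤ p ∨ p ≤ -2) :
    ∀ (m : Nat) (n : Int), n.natAbs ≤ m → (2 ≤ p → 0 ≤ n) → reach p (n.natAbs + 3) n := by
  intro m
  induction m with
  | zero =>
      intro n hm _
      have : n = 0 := by omega
      subst this
      exact Or.inl rfl
  | succ m ih =>
      intro n hm hsign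
      by_cases hn0 : n = 0
      · subst hn0; exact Or.inl rfl
      · have hqsign : 2 ≤ p → 0 ≤ PySem.Int.floordiv n p :=
          fun h2 => fd_nonneg_pos h2 (hsign h2)
        have key : reach p (n.natAbs + 2) (PySem.Int.floordiv n p) := by
          rcases hgood with h2 | hneg
          · have hlt : (PySem.Int.floordiv n p).natAbs < n.natAbs := by
              have := fd_lt_pos h2 (show 0 < n by have := hsign h2; omega)
              have := fd_nonneg_pos h2 (hsign h2)
              omega
            have := ih (PySem.Int.floordiv n p) (by omega) hqsign
            exact reach_mono p _ _ _ this (by omega)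
          · by_cases h3 : 3 ≤ n.natAbs
            · have hlt : (PySem.Int.floordiv n p).natAbs < n.natAbs := natAbs_fd_lt_neg hneg h3
              have := ih (PySem.Int.floordiv n p) (by omega) hqsign
              exact reach_mono p _ _ _ this (by omega)
            · have hq1 : (PySem.Int.floordiv n p).natAbs ≤ 1 := fd_small_neg hneg (by omega)
              have hcases : PySem.Int.floordiv n p = 0 ∨ PySem.Int.floordiv n p = 1 ∨
                  PySem.Int.floordiv n p = -1 := by omega
              rcases hcases with h | h | h
              · rw [h]; exact reach_mono p 1 _ _ (Or.inl rfl) (by omega)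
              · rw [h]; exact reach_mono p 3 _ _ (reach_one hneg) (by omega)
              · rw [h]; exact reach_mono p 2 _ _ (reach_negone hneg) (by omega)
        exact Or.inr (reach_mono p _ _ _ key (by omega))

theorem reach_self {p : Int} (hgood : 2 ≤ p ∨ p ≤ -2) (n : Int) (hsign : 2 ≤ p → 0 ≤ n) :
    reach p (n.natAbs + 3) n :=
  reach_fuel hgood n.natAbs n le_rfl hsign

theorem dl_unfold {p n : Int} (hgood : 2 ≤ p ∨ p ≤ -2) (hsign : 2 ≤ p → 0 ≤ n) (hn : n ≠ 0) :
    dl p (n.natAbs + 3) n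
      = PySem.Int.mod n p :: dl p ((PySem.Int.floordiv n p).natAbs + 3) (PySem.Int.floordiv n p) := by
  have h1 : dl p (n.natAbs + 3) n
      = PySem.Int.mod n p :: dl p (n.natAbs + 2) (PySem.Int.floordiv n p) := by
    rw [show n.natAbs + 3 = (n.natAbs + 2) + 1 from rfl]
    simp [dl, hn]
  rw [h1]
  congr 1
  have hreach : reach p (n.natAbs + 3) n := reach_self hgood n hsign
  have hreach2 : reach p (n.natAbs + 2) (PySem.Int.floordiv n p) := by
    rcases hreach with h | h
    · exact absurd h hn
    · exact h
  have hreach3 : reach p ((PySem.Int.floordiv n p).natAbs + 3) (PySem.Int.floordiv n p) :=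
    reach_self hgood _ (fun h2 => fd_nonneg_pos h2 (hsign h2))
  exact dl_eq_of_reach p _ _ _ hreach2 hreach3

theorem domLoop_singleton_zero (da : List Int) : domLoop da [0] = domLoop da [] := by
  cases da with
  | nil => rfl
  | cons a tl => simp [domLoop]

-- ---- pIter / digAt / lenF bookkeeping ----

theorem pIter_succ (p n : Int) (i : Nat) :
    pIter p (i + 1) n = pIter p i (PySem.Int.floordiv n p) := rfl

theorem pIter_zero_arg (p : Int) : ∀ i, pIter p i 0 = 0 := by
  intro i
  induction i with
  | zero => rfl
  | succ i ih => rw [pIter_succ, fd_zero_left]; exact ih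

theorem pIter_add (p n : Int) (i : Nat) : ∀ j, pIter p (i + j) n = pIter p j (pIter p i n) := by
  induction i generalizing n with
  | zero => intro j; simp [pIter]
  | succ i ih =>
      intro j
      rw [show i + 1 + j = (i + j) + 1 by omega, pIter_succ, ih, pIter_succ]

theorem pIter_stable {p n : Int} {k : Nat} (h : pIter p k n = 0) :
    ∀ j, k ≤ j → pIter p j n = 0 := by
  intro j hj
  have : pIter p (k + (j - k)) n = 0 := by
    rw [pIter_add, h, pIter_zero_arg]
  rwa [show k + (j - k) = j by omega] at this

theorem digAt_succ (p n : Int) (i : Nat) :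
    digAt p n (i + 1) = digAt p (PySem.Int.floordiv n p) i := rfl

theorem digAt_zero_arg (p : Int) (i : Nat) : digAt p 0 i = 0 := by
  unfold digAt
  rw [pIter_zero_arg, mod_zero_left]

theorem digAt_of_pIter_zero {p n : Int} {k : Nat} (h : pIter p k n = 0) :
    ∀ i, k ≤ i → digAt p n i = 0 := by
  intro i hi
  unfold digAt
  rw [pIter_stable h i hi, mod_zero_left]

theorem reach_of_pIter {p : Int} : ∀ (k : Nat) (n : Int), pIter p k n = 0 → reach p k n := by
  intro k
  induction k with
  | zero => intro n h; exact h
  | succ k ih => intro n h; exact Or.inr (ih _ h)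

theorem lenF_succ (p n : Int) (f : Nat) (hn : n ≠ 0) :
    lenF p (f + 1) n = lenF p f (PySem.Int.floordiv n p) + 1 := by
  simp [lenF, hn]

theorem lenF_eq_of_reach (p : Int) : ∀ (k k' : Nat) (n : Int),
    reach p k n → reach p k' n → lenF p k n = lenF p k' n := by
  intro k
  induction k with
  | zero =>
      intro k' n h _
      have : n = 0 := h
      subst this
      cases k' <;> simp [lenF]
  | succ k ih =>
      intro k' n h h'
      by_cases hn : n = 0
      · subst hn; cases k' <;> simp [lenF]
      · rcases h with h | h
        · exact absurd h hn
        · cases k' with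
          | zero => exact absurd h' hn
          | succ k'' =>
              rcases h' with h' | h'
              · exact absurd h' hn
              · simp [lenF, hn, ih k'' _ h h']

theorem lenF_pIter (p : Int) : ∀ (f : Nat) (n : Int), reach p f n → pIter p (lenF p f n) n = 0 := by
  intro f
  induction f with
  | zero =>
      intro n h
      have : n = 0 := h
      subst this; rfl
  | succ f ih =>
      intro n h
      by_cases hn : n = 0
      · subst hn; simp [lenF, pIter]
      · rcases h with h | h
        · exact absurd h hn
        · rw [show lenF p (f + 1) n = lenF p f (PySem.Int.floordiv n p) + 1 by simp [lenF, hn]]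
          rw [pIter_succ]
          exact ih _ h

theorem lenF_min (p : Int) : ∀ (f : Nat) (n : Int), reach p f n →
    ∀ i < lenF p f n, pIter p i n ≠ 0 := by
  intro f
  induction f with
  | zero =>
      intro n h i hi
      simp [lenF] at hi
  | succ f ih =>
      intro n h i hi
      by_cases hn : n = 0
      · simp [lenF, hn] at hi
      · rcases h with h | h
        · exact absurd h hn
        · rw [lenF_succ p n f hn] at hi
          cases i with
          | zero => exact hn
          | succ i =>
              rw [pIter_succ]
              exact ih _ h i (by omega)

theorem lenp_pos {p a : Int} (hra : reach p 64 a) : 0 < lenp p a := by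
  by_cases ha0 : a = 0
  · subst ha0; simp [lenp]
  · unfold lenp
    rw [if_neg ha0]
    rcases hra with h | h
    · exact absurd h ha0
    · rw [show (64:Nat) = 63 + 1 from rfl, lenF_succ p a 63 ha0]
      omega

theorem pIter_eq_iterate (p n : Int) : ∀ i, pIter p i n = (PySem.Int.floordiv · p)^[i] n := by
  intro i
  induction i generalizing n with
  | zero => rfl
  | succ i ih =>
      rw [pIter_succ, Function.iterate_succ_apply]
      exact ih _

theorem pIter_back (p n : Int) (j : Nat) :
    pIter p (j + 1) n = PySem.Int.floordiv (pIter p j n) p := by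
  rw [pIter_add p n j 1]
  rfl

theorem nonzero_digit_exists (p b : Int) : ∀ (d k : Nat), pIter p (k + d) b = 0 →
    pIter p k b ≠ 0 → ∃ j, k ≤ j ∧ j < k + d ∧ digAt p b j ≠ 0 := by
  intro d
  induction d with
  | zero => intro k h0 hne; exact absurd h0 hne
  | succ d ih =>
      intro k h0 hne
      by_cases hdig : digAt p b k ≠ 0
      · exact ⟨k, le_rfl, by omega, hdig⟩
      · push_neg at hdig
        have hrec := PySem.Int.floordiv_mul_add_mod (pIter p k b) p
        have hnext : pIter p (k + 1) b ≠ 0 := by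
          intro hz
          rw [← pIter_back] at hrec
          unfold digAt at hdig
          rw [hz] at hrec
          simp at hrec
          exact hne (by omega)
        have h0' : pIter p (k + 1 + d) b = 0 := by
          rwa [show k + 1 + d = k + (d + 1) by omega]
        obtain ⟨j, hj1, hj2, hj3⟩ := ih (k + 1) h0' hnext
        exact ⟨j, by omega, by omega, hj3⟩

theorem D_iff {a b p : Int} (hp : p ≤ -2) (hra : reach p 64 a) (hrb : pIter p 64 b = 0) :
    D_dominates a b p ↔ (p ≤ -2 ∧ (∀ i < lenp p a, digAt p a i ≤ digAt p b i) ∧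
      ∃ i < 64, lenp p a ≤ i ∧ digAt p b i ≠ 0) := by
  have hzap : pIter p (lenp p a) a = 0 := by
    by_cases ha0 : a = 0
    · subst ha0; exact pIter_zero_arg p _
    · unfold lenp; rw [if_neg ha0]; exact lenF_pIter p 64 a hra
  unfold D_dominates
  simp only [← pIter_eq_iterate]
  constructor
  · rintro ⟨h1, k, hk64, hkpos, hka, hkb, htr⟩
    have hLk : lenp p a ≤ k := by
      by_cases ha0 : a = 0
      · subst ha0; simp [lenp]; omega
      · by_contra hc
        push_neg at hc
        have : k < lenF p 64 a := by
          unfold lenp at hc; rw [if_neg ha0] at hc; exact hc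
        exact lenF_min p 64 a hra k this hka
    have h0' : pIter p (k + (64 - k)) b = 0 := by
      rwa [show k + (64 - k) = 64 by omega]
    obtain ⟨j, hj1, hj2, hj3⟩ := nonzero_digit_exists p b (64 - k) k h0' hkb
    refine ⟨h1, ?_, j, by omega, by omega, hj3⟩
    intro i hi
    exact htr i (by omega)
  · rintro ⟨h1, htrL, j, hj64, hjL, hjne⟩
    refine ⟨h1, lenp p a, by omega, lenp_pos hra, hzap, ?_, ?_⟩
    · intro hz
      exact hjne (digAt_of_pIter_zero hz j hjL)
    · intro i hi
      exact htrL i hi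
-- within the admitted domain, 33 (hence 64) division steps by p ≤ -2 reach 0
theorem iter_small {p : Int} (hp : p ≤ -2) (n : Int) (hn : n.natAbs ≤ 1) : pIter p 2 n = 0 := by
  have h : n = 0 ∨ n = 1 ∨ n = -1 := by omega
  rcases h with h | h | h <;> subst h
  · exact pIter_zero_arg p 2
  · rw [show (2 : Nat) = 1 + 1 from rfl, pIter_succ, fd_one_neg hp, pIter_succ,
      fd_negone_neg hp]
    rfl
  · rw [show (2 : Nat) = 1 + 1 from rfl, pIter_succ, fd_negone_neg hp, pIter_succ, fd_zero_left]
    rfl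

theorem iter_bound {p : Int} (hp : p ≤ -2) : ∀ (k : Nat) (n : Int),
    n.natAbs ≤ 2 ^ k → pIter p (k + 2) n = 0 := by
  intro k
  induction k with
  | zero => intro n hn; exact iter_small hp n (by simpa using hn)
  | succ k ih =>
      intro n hn
      have hhalf : (PySem.Int.floordiv n p).natAbs ≤ 2 ^ k := by
        have h1 := fd_halve_neg (n := n) hp
        have h2 : (2 : Nat) ^ (k + 1) = 2 * 2 ^ k := by rw [pow_succ]; ring
        omega
      rw [show k + 1 + 2 = (k + 2) + 1 by omega, pIter_succ]
      exact ih _ hhalf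

theorem dom_pIter33 {p n : Int} (hp : p ≤ -2) (hn : pvDomInt n = true) : pIter p 33 n = 0 := by
  have hb : n.natAbs ≤ 2 ^ 31 := by
    simp only [pvDomInt, decide_eq_true_eq] at hn
    have : (2 : Nat) ^ 31 = 2147483648 := by norm_num
    omega
  exact iter_bound hp 31 n hb

theorem dom_reach64 {p n : Int} (hp : p ≤ -2) (hn : pvDomInt n = true) : reach p 64 n := by
  have h33 := dom_pIter33 hp hn
  exact reach_of_pIter 64 n (pIter_stable h33 64 (by omega))

-- ---- the carry-count theory in a positive base q ≥ 2 ----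

def SnI (q : Int) (n : Int) : Int :=
  if h : 2 ≤ q ∧ 0 < n then PySem.Int.mod n q + SnI q (PySem.Int.floordiv n q) else 0
termination_by n.toNat
decreasing_by
  have h1 := fd_lt_pos h.1 h.2
  have h2 := fd_nonneg_pos h.1 (le_of_lt h.2)
  omega

def domI (q : Int) (a b : Int) : Bool :=
  if h : 2 ≤ q ∧ 0 < a then
    (if PySem.Int.mod b q < PySem.Int.mod a q then false
     else domI q (PySem.Int.floordiv a q) (PySem.Int.floordiv b q))
  else true
termination_by a.toNat
decreasing_by
  have h1 := fd_lt_pos h.1 h.2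
  have h2 := fd_nonneg_pos h.1 (le_of_lt h.2)
  omega

theorem SnI_base {q n : Int} (h : ¬ (2 ≤ q ∧ 0 < n)) : SnI q n = 0 := by
  rw [SnI, dif_neg h]

theorem SnI_pos {q n : Int} (hq : 2 ≤ q) (hn : 0 < n) :
    SnI q n = PySem.Int.mod n q + SnI q (PySem.Int.floordiv n q) := by
  rw [SnI, dif_pos ⟨hq, hn⟩]

theorem SnI_unfold {q n : Int} (hq : 2 ≤ q) (hn : 0 ≤ n) :
    SnI q n = PySem.Int.mod n q + SnI q (PySem.Int.floordiv n q) := by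
  rcases lt_or_eq_of_le hn with h | h
  · exact SnI_pos hq h
  · rw [← h, SnI_base (by omega), mod_zero_left, fd_zero_left, SnI_base (by omega)]
    omega

theorem domI_base {q a b : Int} (h : ¬ (2 ≤ q ∧ 0 < a)) : domI q a b = true := by
  rw [domI, dif_neg h]

theorem domI_pos {q a b : Int} (hq : 2 ≤ q) (ha : 0 < a) :
    domI q a b = (if PySem.Int.mod b q < PySem.Int.mod a q then false
      else domI q (PySem.Int.floordiv a q) (PySem.Int.floordiv b q)) := by
  rw [domI, dif_pos ⟨hq, ha⟩]

theorem SnI_succ_le {q : Int} (hq : 2 ≤ q) : ∀ (N : Nat) (m : Int), m.toNat ≤ N → 0 ≤ m →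
    SnI q (m + 1) ≤ SnI q m + 1 := by
  intro N
  induction N with
  | zero =>
      intro m hN hm
      have hm0 : m = 0 := by omega
      subst hm0
      have hu := fdm_unique (q := q) (n := (0:Int) + 1) (k := 0) (r := 1)
        (by omega) (by ring) (by omega) (by omega)
      rw [SnI_unfold hq (by omega : (0:Int) ≤ 0 + 1), hu.1, hu.2,
        SnI_base (q := q) (n := (0:Int)) (by omega)]
      omega
  | succ N ih =>
      intro m hN hm
      by_cases hm0 : m = 0
      · subst hm0
        have hu := fdm_unique (q := q) (n := (0:Int) + 1) (k := 0) (r := 1)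
          (by omega) (by ring) (by omega) (by omega)
        rw [SnI_unfold hq (by omega : (0:Int) ≤ 0 + 1), hu.1, hu.2,
          SnI_base (q := q) (n := (0:Int)) (by omega)]
        omega
      · have hrep' := PySem.Int.floordiv_mul_add_mod m q
        set d := PySem.Int.mod m q with hd_def
        set m' := PySem.Int.floordiv m q with hm'_def
        have hrep : m = q * m' + d := by
          have hc : m' * q = q * m' := mul_comm m' q
          linarith
        have hd0 : 0 ≤ d := PySem.Int.mod_nonneg m (by omega)
        have hd1 : d < q := PySem.Int.mod_lt m (by omega)
        have hm'0 : 0 ≤ m' := fd_nonneg_pos hq hm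
        have hm'lt : m' < m := fd_lt_pos hq (by omega)
        by_cases hcase : d < q - 1
        · have hu := fdm_unique (q := q) (n := m + 1) (k := m') (r := d + 1)
            (by omega) (by linarith) (by omega) (by omega)
          rw [SnI_unfold hq (by omega), hu.1, hu.2, SnI_unfold hq hm, ← hd_def, ← hm'_def]
          omega
        · have hu := fdm_unique (q := q) (n := m + 1) (k := m' + 1) (r := 0)
            (by omega) (by rw [mul_add, mul_one]; linarith)
            (by omega) (by omega)
          have hrec : SnI q (m' + 1) ≤ SnI q m' + 1 := ih m' (by omega) hm'0
          rw [SnI_unfold hq (by omega), hu.1, hu.2, SnI_unfold hq hm, ← hd_def, ← hm'_def]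
          omega

theorem carry_main {q : Int} (hq : 2 ≤ q) : ∀ (N : Nat) (a b : Int), a.toNat ≤ N → 0 ≤ a → a ≤ b →
    (domI q a b = decide (SnI q a + SnI q (b - a) = SnI q b)) ∧
      SnI q b ≤ SnI q a + SnI q (b - a) := by
  intro N
  induction N with
  | zero =>
      intro a b hN ha hab
      have ha0 : a = 0 := by omega
      subst ha0
      constructor
      · rw [domI_base (by omega), SnI_base (q := q) (n := (0:Int)) (by omega), sub_zero]
        simp
      · rw [SnI_base (q := q) (n := (0:Int)) (by omega), sub_zero]
        omega
  | succ N ih =>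
      intro a b hN ha hab
      by_cases ha0 : a = 0
      · subst ha0
        constructor
        · rw [domI_base (by omega), SnI_base (q := q) (n := (0:Int)) (by omega), sub_zero]
          simp
        · rw [SnI_base (q := q) (n := (0:Int)) (by omega), sub_zero]
          omega
      · have hb : 0 ≤ b := by omega
        have hrepa' := PySem.Int.floordiv_mul_add_mod a q
        have hrepb' := PySem.Int.floordiv_mul_add_mod b q
        set da := PySem.Int.mod a q with hda_def
        set a' := PySem.Int.floordiv a q with ha'_def
        set db := PySem.Int.mod b q with hdb_def
        set b' := PySem.Int.floordiv b q with hb'_def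
        have hrepa : a = q * a' + da := by
          have hc : a' * q = q * a' := mul_comm a' q
          linarith
        have hrepb : b = q * b' + db := by
          have hc : b' * q = q * b' := mul_comm b' q
          linarith
        have hda0 : 0 ≤ da := PySem.Int.mod_nonneg a (by omega)
        have hda1 : da < q := PySem.Int.mod_lt a (by omega)
        have hdb0 : 0 ≤ db := PySem.Int.mod_nonneg b (by omega)
        have hdb1 : db < q := PySem.Int.mod_lt b (by omega)
        have ha'0 : 0 ≤ a' := fd_nonneg_pos hq ha
        have ha'b' : a' ≤ b' := fd_le_fd hq hab
        have ha'lt : a' < a := fd_lt_pos hq (by omega)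
        have hN' : a'.toNat ≤ N := by omega
        have hSa : SnI q a = da + SnI q a' := by
          rw [SnI_unfold hq ha, ← hda_def, ← ha'_def]
        have hSb : SnI q b = db + SnI q b' := by
          rw [SnI_unfold hq hb, ← hdb_def, ← hb'_def]
        by_cases hcmp : db < da
        · have hdom : domI q a b = false := by
            rw [domI_pos hq (by omega), ← hda_def, ← hdb_def, if_pos hcmp]
          have hlt : a' < b' := by
            rcases eq_or_lt_of_le ha'b' with he | h
            · exfalso; rw [he] at hrepa; linarith
            · exact h
          have hu := fdm_unique (q := q) (n := b - a) (k := b' - a' - 1) (r := db - da + q)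
            (by omega)
            (by rw [mul_sub, mul_sub, mul_one]; linarith)
            (by omega) (by omega)
          have hSba : SnI q (b - a) = (db - da + q) + SnI q (b' - a' - 1) := by
            rw [SnI_unfold hq (by omega), hu.1, hu.2]
          have hineq' := (ih a' b' hN' ha'0 ha'b').2
          have hsucc : SnI q (b' - a') ≤ SnI q (b' - a' - 1) + 1 := by
            have h := SnI_succ_le hq (b' - a' - 1).toNat (b' - a' - 1) le_rfl (by omega)
            rwa [show b' - a' - 1 + 1 = b' - a' by ring] at h
          constructor
          · rw [hdom]
            have hne : ¬ (SnI q a + SnI q (b - a) = SnI q b) := by omega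
            simp [hne]
          · omega
        · have hdom : domI q a b = domI q a' b' := by
            rw [domI_pos hq (by omega), ← hda_def, ← hdb_def, ← ha'_def, ← hb'_def, if_neg hcmp]
          have hu := fdm_unique (q := q) (n := b - a) (k := b' - a') (r := db - da)
            (by omega)
            (by rw [mul_sub]; linarith)
            (by omega) (by omega)
          have hSba : SnI q (b - a) = (db - da) + SnI q (b' - a') := by
            rw [SnI_unfold hq (by omega), hu.1, hu.2]
          obtain ⟨ihEq, ihLe⟩ := ih a' b' hN' ha'0 ha'b'
          constructor
          · rw [hdom, ihEq]
            have hiff : (SnI q a' + SnI q (b' - a') = SnI q b') ↔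
                (SnI q a + SnI q (b - a) = SnI q b) := by omega
            exact decide_eq_decide.mpr hiff
          · omega

theorem domI_le {q : Int} (hq : 2 ≤ q) : ∀ (N : Nat) (a b : Int), a.toNat ≤ N → 0 ≤ a → 0 ≤ b →
    domI q a b = true → a ≤ b := by
  intro N
  induction N with
  | zero =>
      intro a b hN ha hb _
      omega
  | succ N ih =>
      intro a b hN ha hb hdom
      by_cases ha0 : a = 0
      · omega
      · rw [domI_pos hq (by omega)] at hdom
        have hrepa' := PySem.Int.floordiv_mul_add_mod a q
        have hrepb' := PySem.Int.floordiv_mul_add_mod b q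
        by_cases hcmp : PySem.Int.mod b q < PySem.Int.mod a q
        · rw [if_pos hcmp] at hdom
          exact absurd hdom (by simp)
        · rw [if_neg hcmp] at hdom
          have ha'0 : 0 ≤ PySem.Int.floordiv a q := fd_nonneg_pos hq ha
          have hb'0 : 0 ≤ PySem.Int.floordiv b q := fd_nonneg_pos hq hb
          have ha'lt : PySem.Int.floordiv a q < a := fd_lt_pos hq (by omega)
          have hle := ih (PySem.Int.floordiv a q) (PySem.Int.floordiv b q) (by omega) ha'0 hb'0 hdom
          have hmul := mul_le_mul_of_nonneg_right hle (show (0:Int) ≤ q by omega)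
          linarith

theorem domI_digits {q : Int} (hq : 2 ≤ q) : ∀ (N : Nat) (a b : Int), a.toNat ≤ N → 0 ≤ a → 0 ≤ b →
    (domI q a b = true ↔ ∀ i, digAt q a i ≤ digAt q b i) := by
  intro N
  induction N with
  | zero =>
      intro a b hN ha hb
      have ha0 : a = 0 := by omega
      subst ha0
      rw [domI_base (by omega)]
      constructor
      · intro _ i
        rw [digAt_zero_arg]
        exact PySem.Int.mod_nonneg _ (by omega)
      · intro _; rfl
  | succ N ih =>
      intro a b hN ha hb
      by_cases ha0 : a = 0
      · subst ha0
        rw [domI_base (by omega)]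
        constructor
        · intro _ i
          rw [digAt_zero_arg]
          exact PySem.Int.mod_nonneg _ (by omega)
        · intro _; rfl
      · rw [domI_pos hq (by omega)]
        by_cases hcmp : PySem.Int.mod b q < PySem.Int.mod a q
        · rw [if_pos hcmp]
          constructor
          · intro h; exact absurd h (by simp)
          · intro h
            exact absurd (h 0) (not_le.mpr hcmp)
        · rw [if_neg hcmp]
          have ha'0 : 0 ≤ PySem.Int.floordiv a q := fd_nonneg_pos hq ha
          have hb'0 : 0 ≤ PySem.Int.floordiv b q := fd_nonneg_pos hq hb
          have ha'lt : PySem.Int.floordiv a q < a := fd_lt_pos hq (by omega)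
          rw [ih (PySem.Int.floordiv a q) (PySem.Int.floordiv b q) (by omega) ha'0 hb'0]
          constructor
          · intro h i
            cases i with
            | zero => exact not_lt.mp hcmp
            | succ i =>
                rw [digAt_succ, digAt_succ]
                exact h i
          · intro h i
            have := h (i + 1)
            rwa [digAt_succ, digAt_succ] at this

-- ---- bridging B's loops to SnI and to the reinterpreted value ----

theorem dsLoop_eq {q : Int} (hq : 2 ≤ q) : ∀ (f : Nat) (n s : Int), 0 ≤ n → n.natAbs < f →
    dsLoop q f n s = s + SnI q n := by
  intro f
  induction f with
  | zero => intro n s hn hlt; omega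
  | succ f ih =>
      intro n s hn hlt
      by_cases h0 : n = 0
      · subst h0
        simp [dsLoop, SnI_base (show ¬ (2 ≤ q ∧ (0:Int) < 0) by omega)]
      · simp only [dsLoop, h0, if_false]
        have h1 : PySem.Int.floordiv n q < n := fd_lt_pos hq (by omega)
        have h2 : 0 ≤ PySem.Int.floordiv n q := fd_nonneg_pos hq hn
        rw [ih (PySem.Int.floordiv n q) (s + PySem.Int.mod n q) h2 (by omega),
          SnI_unfold hq hn]
        ring

theorem digit_sum_eq {q n : Int} (hq : 2 ≤ q) (hn : 0 ≤ n) : digit_sum n q = SnI q n := by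
  have := dsLoop_eq hq (n.natAbs + 1) n 0 hn (by omega)
  simpa [digit_sum] using this

def stF (p : Int) : Nat → Int → Int
  | 0, _ => 0
  | f + 1, n => if n = 0 then 0
      else (-(PySem.Int.mod n p)) + (-p) * stF p f (PySem.Int.floordiv n p)

theorem riLoop_eq (p : Int) : ∀ (f : Nat) (n w m : Int),
    riLoop p f n w m = w + m * stF p f n := by
  intro f
  induction f with
  | zero => intro n w m; simp [riLoop, stF]
  | succ f ih =>
      intro n w m
      by_cases hn : n = 0
      · simp [riLoop, stF, hn]
      · simp only [riLoop, stF, hn, if_neg, if_false]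
        rw [ih]
        ring

theorem reinterpret_eq (n p : Int) : reinterpret n p = stF p (n.natAbs + 3) n := by
  unfold reinterpret
  rw [riLoop_eq]
  ring

theorem stF_eq_of_reach (p : Int) : ∀ (k k' : Nat) (n : Int),
    reach p k n → reach p k' n → stF p k n = stF p k' n := by
  intro k
  induction k with
  | zero =>
      intro k' n h _
      have : n = 0 := h
      subst this
      cases k' <;> simp [stF]
  | succ k ih =>
      intro k' n h h'
      by_cases hn : n = 0
      · subst hn; cases k' <;> simp [stF]
      · rcases h with h | h
        · exact absurd h hn
        · cases k' with
          | zero => exact absurd h' hn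
          | succ k'' =>
              rcases h' with h' | h'
              · exact absurd h' hn
              · simp [stF, hn, ih k'' _ h h']

theorem stF_unfold {p n : Int} (hp : p ≤ -2) (hn : n ≠ 0) :
    stF p (n.natAbs + 3) n
      = (-(PySem.Int.mod n p)) + (-p) * stF p ((PySem.Int.floordiv n p).natAbs + 3) (PySem.Int.floordiv n p) := by
  have h1 : stF p (n.natAbs + 3) n
      = (-(PySem.Int.mod n p)) + (-p) * stF p (n.natAbs + 2) (PySem.Int.floordiv n p) := by
    rw [show n.natAbs + 3 = (n.natAbs + 2) + 1 from rfl]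
    simp [stF, hn]
  rw [h1]
  have hgood : 2 ≤ p ∨ p ≤ -2 := Or.inr hp
  have hreach : reach p (n.natAbs + 3) n := reach_self hgood n (by intro h2; omega)
  have hreach2 : reach p (n.natAbs + 2) (PySem.Int.floordiv n p) := by
    rcases hreach with h | h
    · exact absurd h hn
    · exact h
  have hreach3 : reach p ((PySem.Int.floordiv n p).natAbs + 3) (PySem.Int.floordiv n p) :=
    reach_self hgood _ (by intro h2; omega)
  rw [stF_eq_of_reach p _ _ _ hreach2 hreach3]

theorem stF_zero_arg (p : Int) (f : Nat) : stF p f 0 = 0 := by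
  cases f <;> simp [stF]

theorem stF_nonneg {p : Int} (hp : p ≤ -2) : ∀ (k : Nat) (n : Int), reach p k n →
    0 ≤ stF p (n.natAbs + 3) n := by
  intro k
  induction k with
  | zero =>
      intro n h
      have : n = 0 := h
      subst this
      rw [stF_zero_arg]
  | succ k ih =>
      intro n h
      by_cases hn : n = 0
      · subst hn; rw [stF_zero_arg]
      · rcases h with h | h
        · exact absurd h hn
        · rw [stF_unfold hp hn]
          have hm := PySem.Int.mod_neg_bounds n (show p < 0 by omega)
          have hrec := ih _ h
          have hmul : 0 ≤ (-p) * stF p ((PySem.Int.floordiv n p).natAbs + 3) (PySem.Int.floordiv n p) :=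
            mul_nonneg (by omega) hrec
          omega

theorem stF_digits {p : Int} (hp : p ≤ -2) : ∀ (k : Nat) (n : Int), reach p k n →
    ∀ i, digAt (-p) (stF p (n.natAbs + 3) n) i = -(digAt p n i) := by
  intro k
  induction k with
  | zero =>
      intro n h i
      have : n = 0 := h
      subst this
      rw [stF_zero_arg, digAt_zero_arg, digAt_zero_arg]
      ring
  | succ k ih =>
      intro n h i
      by_cases hn : n = 0
      · subst hn
        rw [stF_zero_arg, digAt_zero_arg, digAt_zero_arg]
        ring
      · rcases h with h | h
        · exact absurd h hn
        · have hs'0 : 0 ≤ stF p ((PySem.Int.floordiv n p).natAbs + 3) (PySem.Int.floordiv n p) :=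
            stF_nonneg hp k _ h
          have hrepr := stF_unfold (n := n) hp hn
          have hmb := PySem.Int.mod_neg_bounds n (show p < 0 by omega)
          have hu := fdm_unique (q := -p) (n := stF p (n.natAbs + 3) n)
            (k := stF p ((PySem.Int.floordiv n p).natAbs + 3) (PySem.Int.floordiv n p))
            (r := -(PySem.Int.mod n p))
            (by omega) (by linarith) (by omega) (by omega)
          cases i with
          | zero =>
              show PySem.Int.mod (stF p (n.natAbs + 3) n) (-p) = -(PySem.Int.mod n p)
              exact hu.2
          | succ i =>
              rw [digAt_succ, digAt_succ, hu.1]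
              exact ih _ h i

-- ---- relating the two ports to domI / the digit spec ----

theorem pos_sim {p : Int} (hp : 2 ≤ p) : ∀ (k : Nat) (a b : Int), reach p k a → 0 ≤ a → 0 ≤ b →
    domLoop (dl p (a.natAbs + 3) a) (dl p (b.natAbs + 3) b) = domI p a b := by
  intro k
  induction k with
  | zero =>
      intro a b h ha hb
      have ha0 : a = 0 := h
      subst ha0
      rw [dl_zero, domI_base (by omega)]
      rfl
  | succ k ih =>
      intro a b h ha hb
      by_cases ha0 : a = 0
      · subst ha0
        rw [dl_zero, domI_base (by omega)]
        rfl
      · have h' : reach p k (PySem.Int.floordiv a p) := by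
          rcases h with h | h
          · exact absurd h ha0
          · exact h
        have hgood : 2 ≤ p ∨ p ≤ -2 := Or.inl hp
        have ha'0 : 0 ≤ PySem.Int.floordiv a p := fd_nonneg_pos hp ha
        rw [dl_unfold hgood (fun _ => ha) ha0, domI_pos hp (by omega)]
        by_cases hb0 : b = 0
        · subst hb0
          rw [dl_zero, mod_zero_left, fd_zero_left]
          by_cases hda : 0 < PySem.Int.mod a p
          · simp [domLoop, hda]
          · simp only [domLoop, if_neg (show ¬ (PySem.Int.mod a p > 0) from hda), if_neg hda]
            rw [← dl_zero p ((0:Int).natAbs + 3)]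
            exact ih _ 0 h' ha'0 le_rfl
        · rw [dl_unfold hgood (fun _ => hb) hb0]
          by_cases hcmp : PySem.Int.mod b p < PySem.Int.mod a p
          · simp [domLoop, hcmp]
          · simp only [domLoop, if_neg (show ¬ (PySem.Int.mod a p > PySem.Int.mod b p) from hcmp),
              if_neg hcmp]
            exact ih _ _ h' ha'0 (fd_nonneg_pos hp hb)

theorem dominates_pos {a b p : Int} (hp : 2 ≤ p) (ha : 0 ≤ a) (hb : 0 ≤ b) :
    dominates a b p = domI p a b := by
  unfold dominates get_base_digits
  by_cases ha0 : a = 0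
  · subst ha0
    rw [if_pos rfl]
    by_cases hb0 : b = 0
    · subst hb0
      rw [if_pos rfl, domI_base (by omega)]
      rfl
    · rw [if_neg hb0, gbdLoop_append, List.nil_append,
        dl_unfold (Or.inl hp) (fun _ => hb) hb0]
      have hdb : 0 ≤ PySem.Int.mod b p := PySem.Int.mod_nonneg b (by omega)
      rw [domI_base (by omega)]
      simp [domLoop, show ¬ ((0:Int) > PySem.Int.mod b p) by omega]
  · rw [if_neg ha0, gbdLoop_append, List.nil_append]
    have hreach : reach p (a.natAbs + 3) a := reach_self (Or.inl hp) a (fun _ => ha)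
    by_cases hb0 : b = 0
    · subst hb0
      rw [if_pos rfl, domLoop_singleton_zero, ← dl_zero p ((0:Int).natAbs + 3)]
      exact pos_sim hp _ a 0 hreach ha le_rfl
    · rw [if_neg hb0, gbdLoop_append, List.nil_append]
      exact pos_sim hp _ a b hreach ha hb

theorem alt_pos {a b p : Int} (hp : 2 ≤ p) (ha : 0 ≤ a) (hb : 0 ≤ b) :
    dominates_alt a b p = domI p a b := by
  unfold dominates_alt
  simp only [if_neg (show ¬ p < 0 by omega)]
  by_cases hba : b < a
  · simp only [if_pos hba]
    have hf : domI p a b = false := by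
      cases hdd : domI p a b with
      | false => rfl
      | true => exact absurd (domI_le hp a.toNat a b le_rfl ha hb hdd) (by omega)
    rw [hf]
  · simp only [if_neg hba]
    rw [digit_sum_eq hp ha, digit_sum_eq hp (show (0:Int) ≤ b - a by omega),
      digit_sum_eq hp hb]
    exact ((carry_main hp a.toNat a b le_rfl ha (by omega)).1).symm

theorem forall_lt_succ_shift {L : Nat} {P : Nat → Prop} :
    (∀ i < L + 1, P i) ↔ P 0 ∧ ∀ i < L, P (i + 1) := by
  constructor
  · intro h
    exact ⟨h 0 (by omega), fun i hi => h (i + 1) (by omega)⟩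
  · rintro ⟨h0, h⟩ i hi
    cases i with
    | zero => exact h0
    | succ i => exact h i (by omega)

theorem neg_sim {p : Int} (hp : p ≤ -2) : ∀ (k : Nat) (a b : Int), reach p k a → reach p 64 a →
    (domLoop (dl p (a.natAbs + 3) a) (dl p (b.natAbs + 3) b) = true ↔
      ∀ i < lenF p 64 a, digAt p a i ≤ digAt p b i) := by
  intro k
  induction k with
  | zero =>
      intro a b h _
      have ha0 : a = 0 := h
      subst ha0
      rw [dl_zero, show (64:Nat) = 63 + 1 from rfl]
      simp [domLoop, lenF]
  | succ k ih =>
      intro a b h hr64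
      by_cases ha0 : a = 0
      · subst ha0
        rw [dl_zero, show (64:Nat) = 63 + 1 from rfl]
        simp [domLoop, lenF]
      · have h' : reach p k (PySem.Int.floordiv a p) := by
          rcases h with h | h
          · exact absurd h ha0
          · exact h
        have htl : reach p 63 (PySem.Int.floordiv a p) := by
          rcases hr64 with h0 | h0
          · exact absurd h0 ha0
          · exact h0
        have hr64' : reach p 64 (PySem.Int.floordiv a p) := reach_mono p 63 64 _ htl (by omega)
        have hgood : 2 ≤ p ∨ p ≤ -2 := Or.inr hp
        have hlen : lenF p 64 a = lenF p 64 (PySem.Int.floordiv a p) + 1 := by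
          have he : lenF p 63 (PySem.Int.floordiv a p) = lenF p 64 (PySem.Int.floordiv a p) :=
            lenF_eq_of_reach p 63 64 _ htl hr64'
          rw [show (64:Nat) = 63 + 1 from rfl, lenF_succ p a 63 ha0, he]
        rw [dl_unfold hgood (by intro h2; omega) ha0, hlen, forall_lt_succ_shift]
        by_cases hb0 : b = 0
        · subst hb0
          rw [dl_zero]
          have hma : PySem.Int.mod a p ≤ 0 := (PySem.Int.mod_neg_bounds a (by omega)).2
          simp only [domLoop, if_neg (show ¬ (PySem.Int.mod a p > 0) by omega)]
          rw [← dl_zero p ((0:Int).natAbs + 3), ih _ 0 h' hr64']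
          constructor
          · intro hf
            refine ⟨?_, ?_⟩
            · show PySem.Int.mod a p ≤ digAt p 0 0
              rw [digAt_zero_arg]
              exact hma
            · intro i hi
              rw [digAt_succ, digAt_succ, fd_zero_left]
              exact hf i hi
          · rintro ⟨-, hf⟩ i hi
            have := hf i hi
            rwa [digAt_succ, digAt_succ, fd_zero_left] at this
        · rw [dl_unfold hgood (by intro h2; omega) hb0]
          by_cases hcmp : PySem.Int.mod a p > PySem.Int.mod b p
          · simp only [domLoop, if_pos hcmp]
            constructor
            · intro hfalse
              exact absurd hfalse (by simp)
            · rintro ⟨h0, -⟩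
              exact absurd h0 (not_le.mpr hcmp)
          · simp only [domLoop, if_neg hcmp]
            rw [ih _ _ h' hr64']
            constructor
            · intro hf
              refine ⟨not_lt.mp hcmp, ?_⟩
              intro i hi
              rw [digAt_succ, digAt_succ]
              exact hf i hi
            · rintro ⟨-, hf⟩ i hi
              have := hf i hi
              rwa [digAt_succ, digAt_succ] at this

theorem dominates_neg {a b p : Int} (hp : p ≤ -2) (hra : reach p 64 a) :
    (dominates a b p = true ↔ ∀ i < lenp p a, digAt p a i ≤ digAt p b i) := by
  unfold dominates get_base_digits lenp
  by_cases ha0 : a = 0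
  · subst ha0
    rw [if_pos rfl, if_pos rfl]
    by_cases hb0 : b = 0
    · subst hb0
      rw [if_pos rfl]
      constructor
      · intro _ i hi
        have : i = 0 := by omega
        subst this
        rw [digAt_zero_arg]
      · intro _
        rfl
    · rw [if_neg hb0, gbdLoop_append, List.nil_append,
        dl_unfold (Or.inr hp) (by intro h2; omega) hb0]
      by_cases hdb : PySem.Int.mod b p < 0
      · simp only [domLoop, if_pos (show (0:Int) > PySem.Int.mod b p from hdb)]
        constructor
        · intro hfalse
          exact absurd hfalse (by simp)
        · intro hf
          have h0 := hf 0 (by omega)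
          rw [digAt_zero_arg] at h0
          exact absurd h0 (not_le.mpr hdb)
      · simp only [domLoop, if_neg (show ¬ ((0:Int) > PySem.Int.mod b p) from hdb)]
        constructor
        · intro _ i hi
          have : i = 0 := by omega
          subst this
          rw [digAt_zero_arg]
          exact not_lt.mp hdb
        · intro _
          trivial
  · rw [if_neg ha0, if_neg ha0, gbdLoop_append, List.nil_append]
    have hreach : reach p (a.natAbs + 3) a := reach_self (Or.inr hp) a (by intro h2; omega)
    by_cases hb0 : b = 0
    · subst hb0
      rw [if_pos rfl, domLoop_singleton_zero, ← dl_zero p ((0:Int).natAbs + 3)]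
      exact neg_sim hp _ a 0 hreach hra
    · rw [if_neg hb0, gbdLoop_append, List.nil_append]
      exact neg_sim hp _ a b hreach hra

theorem alt_neg {a b p : Int} (hp : p ≤ -2) :
    (dominates_alt a b p = true ↔ ∀ i, digAt p a i ≤ digAt p b i) := by
  have hq2 : 2 ≤ -p := by omega
  have hgood : 2 ≤ p ∨ p ≤ -2 := Or.inr hp
  have hrb : reach p (b.natAbs + 3) b := reach_self hgood b (by intro h2; omega)
  have hra : reach p (a.natAbs + 3) a := reach_self hgood a (by intro h2; omega)
  unfold dominates_alt
  simp only [if_pos (show p < 0 by omega)]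
  rw [reinterpret_eq b p, reinterpret_eq a p]
  set X := stF p (b.natAbs + 3) b with hX_def
  set Y := stF p (a.natAbs + 3) a with hY_def
  have hX0 : 0 ≤ X := stF_nonneg hp _ b hrb
  have hY0 : 0 ≤ Y := stF_nonneg hp _ a hra
  have hXdig : ∀ i, digAt (-p) X i = -(digAt p b i) := stF_digits hp _ b hrb
  have hYdig : ∀ i, digAt (-p) Y i = -(digAt p a i) := stF_digits hp _ a hra
  have hEq : (if Y < X then false
      else decide (digit_sum X (-p) + digit_sum (Y - X) (-p) = digit_sum Y (-p))) = domI (-p) X Y := by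
    by_cases hYX : Y < X
    · rw [if_pos hYX]
      cases hdd : domI (-p) X Y with
      | false => rfl
      | true => exact absurd (domI_le hq2 X.toNat X Y le_rfl hX0 hY0 hdd) (by omega)
    · rw [if_neg hYX, digit_sum_eq hq2 hX0, digit_sum_eq hq2 (show (0:Int) ≤ Y - X by omega),
        digit_sum_eq hq2 hY0]
      exact ((carry_main hq2 X.toNat X Y le_rfl hX0 (by omega)).1).symm
  rw [hEq, domI_digits hq2 X.toNat X Y le_rfl hX0 hY0]
  constructor
  · intro hf i
    have := hf i
    rw [hXdig, hYdig] at this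
    omega
  · intro hf i
    rw [hXdig, hYdig]
    have := hf i
    omega

-- ===== VERDICT (by name: the statements are the Claim_ definitions above) =====
theorem dominates_spec : Claim_unchanged_dominates := by
  intro a b p hdom hpre hnd
  rcases hpre with ⟨hp, ha, hb⟩ | hp | ⟨ha, hb, hp⟩
  · rw [dominates_pos hp ha hb, alt_pos hp ha hb]
  · have hdoms : pvDomInt a = true ∧ pvDomInt b = true := by
      simp only [Dom_dominates, Bool.and_eq_true] at hdom
      exact ⟨hdom.1.1, hdom.1.2⟩
    have hra : reach p 64 a := dom_reach64 hp hdoms.1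
    have hrb64 : pIter p 64 b = 0 := pIter_stable (dom_pIter33 hp hdoms.2) 64 (by omega)
    have hAiff := dominates_neg (a := a) (b := b) hp hra
    have hBiff := alt_neg (a := a) (b := b) (p := p) hp
    by_cases htr : ∀ i < lenp p a, digAt p a i ≤ digAt p b i
    · have hhigh : ∀ i, lenp p a ≤ i → digAt p b i = 0 := by
        intro i hi
        by_cases h64 : i < 64
        · by_contra hne
          exact hnd ((D_iff hp hra hrb64).mpr ⟨hp, htr, i, h64, hi, hne⟩)
        · exact digAt_of_pIter_zero (dom_pIter33 hp hdoms.2) i (by omega)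
      have hfull : ∀ i, digAt p a i ≤ digAt p b i := by
        intro i
        by_cases hi : i < lenp p a
        · exact htr i hi
        · rw [hhigh i (by omega)]
          exact (PySem.Int.mod_neg_bounds (pIter p i a) (show p < 0 by omega)).2
      rw [hAiff.mpr htr, hBiff.mpr hfull]
    · push_neg at htr
      obtain ⟨i, hiL, hgt⟩ := htr
      have hAf : dominates a b p = false := by
        cases hA : dominates a b p with
        | false => rfl
        | true => exact absurd (hAiff.mp hA i hiL) (not_le.mpr hgt)
      have hBf : dominates_alt a b p = false := by
        cases hB : dominates_alt a b p with
        | false => rfl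
        | true => exact absurd (hBiff.mp hB i) (not_le.mpr hgt)
      rw [hAf, hBf]
  · subst ha; subst hb
    rcases hp with hp | hp | hp <;> subst hp <;> decide

theorem dominates_changed : Claim_changed_dominates := by
  unfold Claim_changed_dominates
  decide

theorem dominates_tight : Claim_exact_dominates := by
  intro a b p hdom hpre hD
  have hp : p ≤ -2 := hD.1
  have hdoms : pvDomInt a = true ∧ pvDomInt b = true := by
    simp only [Dom_dominates, Bool.and_eq_true] at hdom
    exact ⟨hdom.1.1, hdom.1.2⟩
  have hra : reach p 64 a := dom_reach64 hp hdoms.1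
  have hrb64 : pIter p 64 b = 0 := pIter_stable (dom_pIter33 hp hdoms.2) 64 (by omega)
  obtain ⟨-, htr, i, hi64, hiL, hne⟩ := (D_iff hp hra hrb64).mp hD
  have hA : dominates a b p = true := (dominates_neg hp hra).mpr htr
  have hdig0 : digAt p a i = 0 := by
    have hz : pIter p (lenp p a) a = 0 := by
      by_cases ha0 : a = 0
      · subst ha0
        exact pIter_zero_arg p _
      · unfold lenp
        rw [if_neg ha0]
        exact lenF_pIter p 64 a hra
    exact digAt_of_pIter_zero hz i hiL
  have hble : digAt p b i ≤ 0 :=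
    (PySem.Int.mod_neg_bounds (pIter p i b) (show p < 0 by omega)).2
  have hBf : dominates_alt a b p = false := by
    cases hB : dominates_alt a b p with
    | false => rfl
    | true =>
        have := (alt_neg hp).mp hB i
        omega
  rw [hA, hBf]
  simp
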